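-- pv_equiv track=rewrite | github.com/NILGroup/TFG-1920-CarlosMoreno | Pruebas/Pruebas aplicaciones web/gmailText.py | clean_decoded_text
-- ===== SOURCE A (Python) =====
-- def clean_decoded_text(text):
--     new_text = ""
--     i = 0
--     n = len(text)
--     while i < n:
--         if (text[i] == '\r' and (i + 1 < n) and text[i + 1] == '\n'):
--             i = i + 2
--             while((i + 1 < n) and text[i] == '\r' and text[i + 1] == '\n'):
--                 new_text = new_text + text[i] + text[i + 1]
--                 i = i + 2
--         else:
--             new_text = new_text + text[i]
--             i = i + 1
--
--     return new_text
-- ===== SOURCE B (Python) =====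
-- def clean_decoded_text(text):
--     # Split on CRLF; the first separator of each maximal CRLF run is dropped,
--     # the rest (each preceded by an empty part) are kept.
--     parts = text.split("\r\n")
--     if len(parts) == 1:
--         return text
--     pieces = [parts[0], parts[1]]
--     prev = parts[1]
--     for cur in parts[2:]:
--         if prev == "":
--             pieces.append("\r\n")
--         pieces.append(cur)
--         prev = cur
--     return "".join(pieces)
-- ===== Notes on version B (the rewrite author's own statement) =====
-- stated objective: faster
-- what changed: Replaces the index-based nested while scan with repeated string concatenation by one CRLF-separator split followed by a single rejoin pass that re-emits a separator exactly when the preceding part is empty (i.e. the separator continues a run), joined once at the end.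
import Mathlib
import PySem

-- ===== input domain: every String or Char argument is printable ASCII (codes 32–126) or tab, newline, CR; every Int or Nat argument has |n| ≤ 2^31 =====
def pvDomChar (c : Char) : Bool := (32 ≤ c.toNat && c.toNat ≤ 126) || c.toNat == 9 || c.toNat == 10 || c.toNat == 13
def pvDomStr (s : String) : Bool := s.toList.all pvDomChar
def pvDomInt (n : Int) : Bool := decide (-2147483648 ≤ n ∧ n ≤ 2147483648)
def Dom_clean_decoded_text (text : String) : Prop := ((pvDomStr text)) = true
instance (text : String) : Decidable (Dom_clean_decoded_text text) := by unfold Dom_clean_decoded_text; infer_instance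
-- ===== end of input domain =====

-- B splits on the CRLF separator and rejoins in one pass (the first CRLF of each run dropped, joined once) instead of A's nested index loops with repeated concatenation; measured faster.

-- ===== PORT A =====
-- inner while loop of A: copies consecutive CRLF pairs, returns the new index and accumulator
def aInner (cs : List Char) (n i : Nat) (acc : List Char) : Nat × List Char :=
  if _h : i + 1 < n ∧ cs.getD i ' ' = '\r' ∧ cs.getD (i + 1) ' ' = '\n' then
    aInner cs n (i + 2) (acc ++ [cs.getD i ' ', cs.getD (i + 1) ' '])
  else (i, acc)
termination_by n - i
decreasing_by omega

theorem aInner_le (cs : List Char) (n i : Nat) (acc : List Char) :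
    i ≤ (aInner cs n i acc).1 := by
  fun_induction aInner with
  | case1 i acc h ih => omega
  | case2 => simp

-- outer while loop of A
def aOuter (cs : List Char) (n i : Nat) (acc : List Char) : List Char :=
  if _h : i < n then
    if cs.getD i ' ' = '\r' ∧ i + 1 < n ∧ cs.getD (i + 1) ' ' = '\n' then
      aOuter cs n (aInner cs n (i + 2) acc).1 (aInner cs n (i + 2) acc).2
    else
      aOuter cs n (i + 1) (acc ++ [cs.getD i ' '])
  else acc
termination_by n - i
decreasing_by
  · have := aInner_le cs n (i + 2) acc; omega
  · omega

def clean_decoded_text (text : String) : String :=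
  String.ofList (aOuter text.toList text.toList.length 0 [])

-- ===== PORT B =====
-- rejoin loop of B: `prev` is the part most recently emitted, a kept separator is CRLF
def bLoop (prev : List Char) (rest : List (List Char)) (acc : List Char) : List Char :=
  match rest with
  | [] => acc
  | cur :: tl => bLoop cur tl ((if prev = [] then acc ++ ['\r', '\n'] else acc) ++ cur)

def clean_decoded_text_alt (text : String) : String :=
  match PySem.Chars.splitOn text.toList ['\r', '\n'] with
  | [] => text          -- unreachable: split never returns an empty list
  | [_] => text         -- len(parts) == 1
  | p0 :: p1 :: tl => String.ofList (bLoop p1 tl (p0 ++ p1))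

-- ===== PRECONDITION & SPEC =====
def Spec_clean_decoded_text (text : String) (out : String) : Prop := out = clean_decoded_text_alt text
instance (text : String) (out : String) : Decidable (Spec_clean_decoded_text text out) := by unfold Spec_clean_decoded_text; infer_instance

-- ===== CLAIM (what is proved, stated in full; the proofs are below) =====
def Claim_equal_clean_decoded_text : Prop := ∀ (text : String), Dom_clean_decoded_text text → Spec_clean_decoded_text text (clean_decoded_text text)

-- ===== LEMMAS AND PROOFS =====

-- reference function: ref false = "drop the first CRLF of each maximal run, keep the rest"
def ref (inRun : Bool) (l : List Char) : List Char :=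
  match l with
  | '\r' :: '\n' :: rest => (if inRun then ['\r', '\n'] else []) ++ ref true rest
  | c :: rest => c :: ref false rest
  | [] => []

-- recursive characterisation of PySem.Chars.splitOn on separator "\r\n"
def mysplit (cur : List Char) (l : List Char) : List (List Char) :=
  match l with
  | '\r' :: '\n' :: rest => cur :: mysplit [] rest
  | c :: rest => mysplit (cur ++ [c]) rest
  | [] => [cur]

theorem mysplit_ne_nil (cur l : List Char) : mysplit cur l ≠ [] := by
  fun_induction mysplit <;> simp_all

-- ref on a list not starting with CRLF steps like a plain cons, whatever the flag
theorem ref_cons_of_not (b : Bool) (c : Char) (rest : List Char)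
    (h : ¬(c = '\r' ∧ ∃ r, rest = '\n' :: r)) : ref b (c :: rest) = c :: ref false rest := by
  apply ref.eq_2
  intro r hc hr
  exact h ⟨hc, r, hr⟩

theorem ref_true_eq_false (l : List Char) (h : ¬∃ r, l = '\r' :: '\n' :: r) :
    ref true l = ref false l := by
  match l with
  | [] => rfl
  | c :: rest =>
    have h' : ¬(c = '\r' ∧ ∃ r, rest = '\n' :: r) := by
      rintro ⟨hc, r, hr⟩; exact h ⟨r, by rw [hc, hr]⟩
    rw [ref_cons_of_not true c rest h', ref_cons_of_not false c rest h']

-- PySem's fuel-based split agrees with mysplit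
theorem go_eq (fuel : Nat) (l cur : List Char) (acc : List (List Char)) (h : l.length < fuel) :
    PySem.Chars.splitOn.go ['\r', '\n'] fuel l cur acc = acc.reverse ++ mysplit cur.reverse l := by
  induction fuel generalizing l cur acc with
  | zero => omega
  | succ f ih =>
    rw [PySem.Chars.splitOn.go.eq_def]
    match l with
    | [] => simp [mysplit]
    | c :: rest =>
      simp only []
      by_cases hp : List.isPrefixOf ['\r', '\n'] (c :: rest) = true
      · obtain ⟨hc, hpre⟩ := List.cons_prefix_cons.mp (List.isPrefixOf_iff_prefix.mp hp)
        obtain ⟨r, hr⟩ : ∃ r, rest = '\n' :: r := by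
          cases rest with
          | nil => simp at hpre
          | cons d r => obtain ⟨hd, _⟩ := List.cons_prefix_cons.mp hpre; exact ⟨r, by rw [← hd]⟩
        subst hr
        rw [if_pos hp, ← hc]
        have := ih r [] (cur.reverse :: acc) (by simp at h ⊢; omega)
        simp only [List.length_cons, List.length_nil, List.drop_succ_cons, List.drop_zero] at this ⊢
        rw [this]
        simp [mysplit]
      · rw [if_neg hp]
        rw [ih rest (c :: cur) acc (by simp at h ⊢; omega)]
        have hnot : ¬(c = '\r' ∧ ∃ r, rest = '\n' :: r) := by
          rintro ⟨hc, r, hr⟩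
          subst hc hr
          simp at hp
        have : mysplit cur.reverse (c :: rest) = mysplit (cur.reverse ++ [c]) rest := by
          apply mysplit.eq_2
          intro r hc hr
          exact hnot ⟨hc, r, hr⟩
        rw [this]
        simp

theorem splitOn_eq (cs : List Char) :
    PySem.Chars.splitOn cs ['\r', '\n'] = mysplit [] cs := by
  rw [PySem.Chars.splitOn.eq_def]
  have := go_eq (cs.length + 1) cs [] [] (by omega)
  simpa using this

-- a single part means no CRLF anywhere: ref false is the identity there
theorem single_eq (l cur x : List Char) (h : mysplit cur l = [x]) : ref false l = l := by
  fun_induction mysplit generalizing x with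
  | case1 cur rest ih =>
    exact absurd h (by have := mysplit_ne_nil ([] : List Char) rest; cases hm : mysplit [] rest <;> simp_all)
  | case2 cur c rest hne ih =>
    rw [ref_cons_of_not false c rest (by rintro ⟨hc, r, hr⟩; exact hne r hc hr)]
    rw [ih _ h]
  | case3 => rfl

theorem mysplit_cons_of_not (cur : List Char) (c : Char) (rest : List Char)
    (h : ¬(c = '\r' ∧ ∃ r, rest = '\n' :: r)) :
    mysplit cur (c :: rest) = mysplit (cur ++ [c]) rest := by
  apply mysplit.eq_2
  intro r hc hr
  exact h ⟨hc, r, hr⟩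

-- the rejoin loop reconstructs ref over the parts of mysplit
theorem bLoop_ref (n : Nat) : ∀ (l : List Char), l.length ≤ n →
    (∀ prev tl acc, mysplit [] l = prev :: tl → bLoop prev tl (acc ++ prev) = acc ++ ref true l) ∧
    (∀ cur prev tl acc, cur ≠ [] → mysplit cur l = prev :: tl →
      bLoop prev tl (acc ++ prev) = acc ++ cur ++ ref false l) := by
  induction n with
  | zero =>
    intro l hl
    have : l = [] := by cases l <;> simp_all
    subst this
    constructor
    · intro prev tl acc h
      simp [mysplit] at h
      obtain ⟨h1, h2⟩ := h
      subst h1; subst h2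
      simp [bLoop, ref]
    · intro cur prev tl acc _ h
      simp [mysplit] at h
      obtain ⟨h1, h2⟩ := h
      subst h1; subst h2
      simp [bLoop, ref]
  | succ n ih =>
    intro l hl
    match l with
    | [] =>
      exact ih [] (by simp)
    | c :: rest =>
      by_cases hC : c = '\r' ∧ ∃ r, rest = '\n' :: r
      · obtain ⟨hc, r, hr⟩ := hC
        subst hc; subst hr
        have hrlen : r.length ≤ n := by simp at hl; omega
        constructor
        · intro prev tl acc h
          rw [mysplit.eq_1] at h
          injection h with h1 h2
          subst h1; subst h2
          cases hq : mysplit [] r with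
          | nil => exact absurd hq (mysplit_ne_nil _ _)
          | cons q tl' =>
            simp only [bLoop, List.append_nil]
            rw [if_pos trivial, (ih r hrlen).1 q tl' (acc ++ ['\r', '\n']) hq, ref.eq_1]
            simp
        · intro cur prev tl acc hcur h
          rw [mysplit.eq_1] at h
          injection h with h1 h2
          subst h1; subst h2
          cases hq : mysplit [] r with
          | nil => exact absurd hq (mysplit_ne_nil _ _)
          | cons q tl' =>
            simp only [bLoop]
            rw [if_neg hcur, (ih r hrlen).1 q tl' (acc ++ cur) hq, ref.eq_1]
            simp
      · have hstep : ∀ x, mysplit x (c :: rest) = mysplit (x ++ [c]) rest :=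
          fun x => mysplit_cons_of_not x c rest hC
        have hrlen : rest.length ≤ n := by simp at hl; omega
        have href : ∀ b, ref b (c :: rest) = c :: ref false rest :=
          fun b => ref_cons_of_not b c rest hC
        constructor
        · intro prev tl acc h
          rw [hstep] at h
          simp only [List.nil_append] at h
          have := (ih rest hrlen).2 [c] prev tl acc (by simp) h
          rw [href, this]
          simp
        · intro cur prev tl acc hcur h
          rw [hstep] at h
          have := (ih rest hrlen).2 (cur ++ [c]) prev tl acc (by simp) h
          rw [href, this]
          simp

-- prefix decomposition: the first part plus ref true of the remainder
theorem mysplit_head (n : Nat) : ∀ (l cur : List Char) (p0 p1 : List Char) (tl : List (List Char)),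
    l.length ≤ n → mysplit cur l = p0 :: p1 :: tl →
    ∃ r, mysplit [] r = p1 :: tl ∧ cur ++ ref false l = p0 ++ ref true r := by
  induction n with
  | zero =>
    intro l cur p0 p1 tl hl h
    have : l = [] := by cases l <;> simp_all
    subst this
    simp [mysplit] at h
  | succ n ih =>
    intro l cur p0 p1 tl hl h
    match l with
    | [] => simp [mysplit] at h
    | c :: rest =>
      by_cases hC : c = '\r' ∧ ∃ r, rest = '\n' :: r
      · obtain ⟨hc, r, hr⟩ := hC
        subst hc; subst hr
        rw [mysplit.eq_1] at h
        obtain ⟨h1, h2⟩ := List.cons.injEq .. ▸ h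
        subst h1
        exact ⟨r, h2, by rw [ref.eq_1]; simp⟩
      · rw [mysplit_cons_of_not cur c rest hC] at h
        have hrlen : rest.length ≤ n := by simp at hl; omega
        obtain ⟨r, hr1, hr2⟩ := ih rest (cur ++ [c]) p0 p1 tl hrlen h
        refine ⟨r, hr1, ?_⟩
        rw [ref_cons_of_not false c rest hC]
        simpa using hr2

theorem alt_eq (text : String) :
    clean_decoded_text_alt text = String.ofList (ref false text.toList) := by
  unfold clean_decoded_text_alt
  rw [splitOn_eq]
  cases hm : mysplit [] text.toList with
  | nil => exact absurd hm (mysplit_ne_nil _ _)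
  | cons p0 ps =>
    cases ps with
    | nil =>
      show text = String.ofList (ref false text.toList)
      rw [single_eq _ _ _ hm, String.ofList_toList]
    | cons p1 tl =>
      obtain ⟨r, hr1, hr2⟩ := mysplit_head text.toList.length text.toList [] p0 p1 tl (le_refl _) hm
      simp only [List.nil_append] at hr2
      have := (bLoop_ref r.length r (le_refl _)).1 p1 tl p0 hr1
      show String.ofList (bLoop p1 tl (p0 ++ p1)) = String.ofList (ref false text.toList)
      rw [this, ← hr2]

-- when A's outer condition fails at i, the list from i does not start with CRLF
theorem not_crlf_at (cs : List Char) (i : Nat) (hlt : i < cs.length)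
    (hcond : ¬(cs.getD i ' ' = '\r' ∧ i + 1 < cs.length ∧ cs.getD (i + 1) ' ' = '\n')) :
    ¬(cs[i] = '\r' ∧ ∃ r, cs.drop (i + 1) = '\n' :: r) := by
  rintro ⟨h1, r, hr⟩
  have hlen : i + 1 < cs.length := by
    have := congrArg List.length hr
    simp [List.length_drop] at this
    omega
  have h2 : cs[i + 1] = '\n' := by
    have hd := List.drop_eq_getElem_cons (l := cs) hlen
    rw [hr] at hd
    injection hd with ha _
    exact ha.symm
  exact hcond ⟨by rw [List.getD_eq_getElem cs ' ' hlt, h1], hlen,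
    by rw [List.getD_eq_getElem cs ' ' hlen, h2]⟩

theorem aMain (k : Nat) : ∀ (cs : List Char) (i : Nat) (acc : List Char),
    cs.length - i ≤ k → i ≤ cs.length →
    (aOuter cs cs.length i acc = acc ++ ref false (cs.drop i)) ∧
    (aOuter cs cs.length (aInner cs cs.length i acc).1 (aInner cs cs.length i acc).2
      = acc ++ ref true (cs.drop i)) := by
  induction k with
  | zero =>
    intro cs i acc hk hi
    have hie : i = cs.length := by omega
    constructor
    · rw [aOuter, dif_neg (by omega)]
      rw [hie]
      simp [ref]
    · rw [aInner, dif_neg (by omega)]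
      rw [aOuter, dif_neg (by omega)]
      rw [hie]
      simp [ref]
  | succ k ih =>
    intro cs i acc hk hi
    by_cases hlt : i < cs.length
    · have hgd : cs.getD i ' ' = cs[i] := List.getD_eq_getElem cs ' ' hlt
      have hdrop : cs.drop i = cs[i] :: cs.drop (i + 1) := List.drop_eq_getElem_cons hlt
      by_cases hcond : cs.getD i ' ' = '\r' ∧ i + 1 < cs.length ∧ cs.getD (i + 1) ' ' = '\n'
      · obtain ⟨h1, h2, h3⟩ := hcond
        have hgd2 : cs.getD (i + 1) ' ' = cs[i + 1] := List.getD_eq_getElem cs ' ' h2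
        have hdrop2 : cs.drop (i + 1) = cs[i + 1] :: cs.drop (i + 2) := List.drop_eq_getElem_cons h2
        have hrefdrop : cs.drop i = '\r' :: '\n' :: cs.drop (i + 2) := by
          rw [hdrop, hdrop2, ← hgd, ← hgd2, h1, h3]
        have HO : aOuter cs cs.length i acc = acc ++ ref false (cs.drop i) := by
          rw [aOuter, dif_pos hlt, if_pos ⟨h1, h2, h3⟩]
          rw [(ih cs (i + 2) acc (by omega) (by omega)).2]
          rw [hrefdrop, ref.eq_1]
          simp
        refine ⟨HO, ?_⟩
        rw [aInner, dif_pos ⟨h2, h1, h3⟩]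
        rw [h1, h3]
        rw [(ih cs (i + 2) (acc ++ ['\r', '\n']) (by omega) (by omega)).2]
        rw [hrefdrop, ref.eq_1]
        simp
      · have hnc := not_crlf_at cs i hlt hcond
        have HO : aOuter cs cs.length i acc = acc ++ ref false (cs.drop i) := by
          rw [aOuter, dif_pos hlt, if_neg hcond]
          rw [(ih cs (i + 1) (acc ++ [cs.getD i ' ']) (by omega) (by omega)).1]
          rw [hdrop, ref_cons_of_not false cs[i] _ hnc, hgd]
          simp
        refine ⟨HO, ?_⟩
        have hcond' : ¬(i + 1 < cs.length ∧ cs.getD i ' ' = '\r' ∧ cs.getD (i + 1) ' ' = '\n') := by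
          tauto
        rw [aInner, dif_neg hcond']
        rw [HO]
        congr 1
        rw [ref_true_eq_false]
        rintro ⟨r, hr⟩
        rw [hdrop] at hr
        injection hr with ha hb
        exact hnc ⟨ha, r, hb⟩
    · have hie : i = cs.length := by omega
      constructor
      · rw [aOuter, dif_neg (by omega)]
        rw [hie]
        simp [ref]
      · rw [aInner, dif_neg (by omega)]
        rw [aOuter, dif_neg (by omega)]
        rw [hie]
        simp [ref]

theorem a_eq (text : String) :
    clean_decoded_text text = String.ofList (ref false text.toList) := by
  unfold clean_decoded_text
  rw [(aMain text.toList.length text.toList 0 [] (by omega) (by omega)).1]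
  simp

-- ===== VERDICT (by name: the statement is the Claim_ definition above) =====
theorem clean_decoded_text_spec : Claim_equal_clean_decoded_text := by
  intro text _
  unfold Spec_clean_decoded_text
  rw [a_eq, alt_eq]
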